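-- pv_equiv track=rewrite | github.com/aisyui/gpt | rust/mcp/server.py | generate_basic_summary
-- ===== SOURCE A (Python) =====
-- from typing import List, Dict, Any, Optional
--
-- def generate_basic_summary(messages: List[Dict[str, Any]]) -> str:
--     """基本要約を生成"""
--     if not messages:
--         return "Empty conversation"
--
--     user_messages = [msg for msg in messages if msg["role"] == "user"]
--     assistant_messages = [msg for msg in messages if msg["role"] == "assistant"]
--
--     summary = f"Conversation with {len(user_messages)} user messages and {len(assistant_messages)} assistant responses. "
--
--     if user_messages:
--         first_user_msg = user_messages[0]["content"][:100]
--         summary += f"Started with: {first_user_msg}..."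
--
--     return summary
-- ===== SOURCE B (Python) =====
-- def generate_basic_summary(messages):
--     """基本要約を生成"""
--     if not messages:
--         return "Empty conversation"
--
--     users = 0
--     assistants = 0
--     first_user_content = None
--     for msg in messages:
--         role = msg["role"]
--         if role == "user":
--             users += 1
--             if first_user_content is None:
--                 first_user_content = msg["content"]
--         elif role == "assistant":
--             assistants += 1
--
--     summary = f"Conversation with {users} user messages and {assistants} assistant responses. "
--     if first_user_content is not None:
--         summary += f"Started with: {first_user_content[:100]}..."
--     return summary
-- ===== Notes on version B (the rewrite author's own statement) =====
-- stated objective: simpler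
-- what changed: Replaces the two filtering list comprehensions plus a later indexed lookup with one pass over the messages that maintains both counts and captures the first user message's content as it goes.
import Mathlib
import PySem

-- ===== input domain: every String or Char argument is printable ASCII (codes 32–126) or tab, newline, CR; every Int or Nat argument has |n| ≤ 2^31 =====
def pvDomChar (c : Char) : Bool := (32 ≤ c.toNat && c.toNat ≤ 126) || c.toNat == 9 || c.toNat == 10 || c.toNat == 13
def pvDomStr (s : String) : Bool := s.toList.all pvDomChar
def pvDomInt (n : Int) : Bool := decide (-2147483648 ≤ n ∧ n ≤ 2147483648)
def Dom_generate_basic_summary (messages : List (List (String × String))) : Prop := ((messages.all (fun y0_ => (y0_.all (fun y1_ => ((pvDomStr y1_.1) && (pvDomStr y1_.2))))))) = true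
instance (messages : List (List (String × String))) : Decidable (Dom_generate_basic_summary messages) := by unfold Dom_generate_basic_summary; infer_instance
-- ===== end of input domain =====

-- B is a single pass maintaining both counts and the first user content, instead of A's
-- two filtering comprehensions plus a later indexed lookup.  Same return value on Pre_.

-- ===== PORT A =====
-- dict lookup msg[k] on an association list: first match; none = KeyError (excluded by Pre_)
def dget? (m : List (String × String)) (k : String) : Option String :=
  (m.find? (fun p => p.1 == k)).map (·.2)

def generate_basic_summary (messages : List (List (String × String))) : String :=
  if messages.isEmpty then "Empty conversation" else
  let user_messages := messages.filter (fun m => dget? m "role" == some "user")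
  let assistant_messages := messages.filter (fun m => dget? m "role" == some "assistant")
  let summary := "Conversation with ".toList ++ PySem.Int.toChars (user_messages.length : Int)
      ++ " user messages and ".toList ++ PySem.Int.toChars (assistant_messages.length : Int)
      ++ " assistant responses. ".toList
  match user_messages with
  | [] => String.ofList summary
  | m :: _ =>
      let first_user_msg := PySem.List.slice ((dget? m "content").getD "").toList none (some 100)
      String.ofList (summary ++ "Started with: ".toList ++ first_user_msg ++ "...".toList)

-- ===== PORT B =====
def bStep (st : Int × Int × Option String) (m : List (String × String)) : Int × Int × Option String :=
  let role := dget? m "role"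
  if role == some "user" then
    (st.1 + 1, st.2.1,
      match st.2.2 with
      | none => some ((dget? m "content").getD "")
      | some c => some c)
  else if role == some "assistant" then (st.1, st.2.1 + 1, st.2.2)
  else st

def generate_basic_summary_alt (messages : List (List (String × String))) : String :=
  if messages.isEmpty then "Empty conversation" else
  let st := messages.foldl bStep (0, 0, none)
  let summary := "Conversation with ".toList ++ PySem.Int.toChars st.1
      ++ " user messages and ".toList ++ PySem.Int.toChars st.2.1
      ++ " assistant responses. ".toList
  match st.2.2 with
  | none => String.ofList summary
  | some c => String.ofList (summary ++ "Started with: ".toList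
      ++ PySem.List.slice c.toList none (some 100) ++ "...".toList)

-- ===== PRECONDITION & SPEC =====
-- Pre_ excludes exactly the inputs where the Python A raises KeyError: a message without a
-- "role" key, or a first user message without a "content" key (B raises there too).
def Pre_generate_basic_summary (messages : List (List (String × String))) : Prop :=
  (messages.all (fun m => (dget? m "role").isSome)
    && (messages.find? (fun m => dget? m "role" == some "user")).all
         (fun m => (dget? m "content").isSome)) = true
instance (messages : List (List (String × String))) : Decidable (Pre_generate_basic_summary messages) := by unfold Pre_generate_basic_summary; infer_instance

def pvWitness_generate_basic_summary : (List (List (String × String))) :=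
  [[("role", "user"), ("content", "hi")], [("role", "assistant"), ("content", "hello")]]

def Spec_generate_basic_summary (messages : List (List (String × String))) (out : String) : Prop := out = generate_basic_summary_alt messages
instance (messages : List (List (String × String))) (out : String) : Decidable (Spec_generate_basic_summary messages out) := by unfold Spec_generate_basic_summary; infer_instance

-- ===== CLAIM (what is proved, stated in full; the proofs are below) =====
def Claim_equal_generate_basic_summary : Prop := ∀ (messages : List (List (String × String))), Dom_generate_basic_summary messages → Pre_generate_basic_summary messages → Spec_generate_basic_summary messages (generate_basic_summary messages)

-- ===== LEMMAS AND PROOFS =====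

-- the single pass computes the two filter-lengths and the head of the user filter
theorem bFold_spec (msgs : List (List (String × String))) (u a : Int) (f : Option String) :
    msgs.foldl bStep (u, a, f) =
      (u + (msgs.filter (fun m => dget? m "role" == some "user")).length,
       a + (msgs.filter (fun m => dget? m "role" == some "assistant")).length,
       f.or (((msgs.filter (fun m => dget? m "role" == some "user")).head?).map
               (fun m => (dget? m "content").getD ""))) := by
  induction msgs generalizing u a f with
  | nil => simp
  | cons m rest ih =>
    simp only [List.foldl_cons, bStep]
    by_cases hu : dget? m "role" == some "user"
    · have ha : ¬ (dget? m "role" == some "assistant") := by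
        simp only [beq_iff_eq] at hu ⊢; simp [hu]
      simp only [hu, if_pos, List.filter_cons, ha]
      cases f with
      | none => simp [ih]; omega
      | some c => simp [ih]; omega
    · by_cases ha : dget? m "role" == some "assistant"
      · simp [hu, ha, ih]; omega
      · simp [hu, ha, ih]

-- ===== VERDICT (by name: the statement is the Claim_ definition above) =====
theorem generate_basic_summary_spec : Claim_equal_generate_basic_summary := by
  intro messages _ _
  unfold Spec_generate_basic_summary generate_basic_summary generate_basic_summary_alt
  by_cases h : messages.isEmpty
  · simp [h]
  · simp only [h, if_neg, Bool.false_eq_true, not_false_eq_true]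
    rw [bFold_spec]
    cases hf : (messages.filter (fun m => dget? m "role" == some "user")).head? with
    | none =>
        cases hl : messages.filter (fun m => dget? m "role" == some "user") with
        | nil => simp
        | cons x xs => rw [hl] at hf; simp at hf
    | some m =>
        cases hl : messages.filter (fun m => dget? m "role" == some "user") with
        | nil => rw [hl] at hf; simp at hf
        | cons x xs =>
            rw [hl] at hf
            simp only [List.head?_cons, Option.some.injEq] at hf
            subst hf
            simp
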